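-- pv_equiv track=rewrite | github.com/Casassarnau/Kalorika | llista.py | llista_pes
-- ===== SOURCE A (Python) =====
-- def tipus_ingr(llista_tipus, llista, ingredient, quantitat1, quantitat2):
--     quantitat_princ = 0
--     quantitat_sec = 0
--     res = []
--     for item in llista_tipus:
--         if ingredient == item:
--             quantitat_princ = quantitat1
--             quantitat_sec = quantitat2
--             for y in llista:
--                 if y not in llista_tipus:
--                     res.append(y)
--
--     return quantitat_princ, quantitat_sec, res
--
-- def llista_pes(llista, ingredient):
--     peixos = ["mackerel", "fish", "fish steak", "salmon steak", "fish fillet", "salmon", "bass", "sea bass",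
--               "fried calamari", "shrimp", "prawn"]
--     q_p, q_s, ll_neta = tipus_ingr(peixos, llista, ingredient, "150g ", "30g ")
--     if q_p:
--         return q_p, q_s, ll_neta
--
--     pasta = ["pasta", "spaghetti", "macaroni", "penne", "fettuccine", "spaghetti bolognese", "tagliatelle", "rice",
--              "noodle", "lasagna", "gnocchi"]
--     q_p, q_s, ll_neta = tipus_ingr(pasta, llista, ingredient, "200g cooked ", "20g ")
--     if q_p:
--         return q_p, q_s, ll_neta
--
--     llegum = ["lentil", "beans", "lima bean", "pigeon pea", "garbanzo", "kidney bean", "chickpeas", "indian pea", "pea",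
--               "succotash", "moth bean", "horse gram", "buckwheat", "groats", "mung bean"]
--     q_p, q_s, ll_neta = tipus_ingr(llegum, llista, ingredient, "170g cooked ", "30g ")
--     if q_p:
--         return q_p, q_s, ll_neta
--
--     pastissos = ["brownie", "chocolate cake", "torte", "chocolate chip cake", "fruitcake", "apple pie", "bread pudding",
--                  "pastry", "muffin", "cookie", "blueberry muffin", "raisin muffin", "pork pie", "chocolate cookie",
--                  "candy", "cream", "chocolate", "doughnut"]
--     q_p, q_s, ll_neta = tipus_ingr(pastissos, llista, ingredient, "100g ", "20g ")
--     if q_p: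
--         return q_p, q_s, ll_neta
--
--     verdura = ["vegetable", "tomato", "carrot", "squash", "pumpkin", "celery", "curry", "cucumber", "broccoli",
--                "eggplant", "avocado", "onion", "cauliflower", "asparagus", "courgette", "pepper"]
--     q_p, q_s, ll_neta = tipus_ingr(verdura, llista, ingredient, "150g ", "50g ")
--     if q_p:
--         return q_p, q_s, ll_neta
--
--     fruita = ["berry", "blueberry", "strawberry", "blackberry", "raspberry", "banana", "black currant", "pineapple",
--               "apple", "lemon", "watermelon", "pear", "peach", "melon", "grape", "grapefruit"]
--     q_p, q_s, ll_neta = tipus_ingr(fruita, llista, ingredient, "150g ", "30g ")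
--     if q_p:
--         return q_p, q_s, ll_neta
--
--     begudes = ["wine", "beer", "syrup", "coke", "lemonade", "milk", "tea"]
--     q_p, q_s, ll_neta = tipus_ingr(begudes, llista, ingredient, "180ml ", "50g ")
--     if q_p:
--         n = 0
--         for x in ll_neta:
--             if x == "cream":
--                 del ll_neta[n]
--             n += 1
--         return q_p, q_s, ll_neta
--
--     begudes_a = ["whisky", "rum", "brandy", "cognac", "liqueur", "tequila", "vodka"]
--     q_p, q_s, ll_neta = tipus_ingr(begudes_a, llista, ingredient, "30ml ", "0g ")
--     if q_p:
--         return q_p, q_s, ll_neta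
--
--     patata = ["potato", "sweet potato", "mashed potatoes", "french fries", "chips"]
--     q_p, q_s, ll_neta = tipus_ingr(patata, llista, ingredient, "150g ", "15g ")
--     if q_p:
--         return q_p, q_s, ll_neta
--
--     pizza = ["pizza", "dough"]
--     q_p, q_s, ll_neta = tipus_ingr(pizza, llista, ingredient, "150g ", "5g ")
--     if q_p:
--         return q_p, q_s, ll_neta
--
--     carns = ["steak", "beef", "pork", "beef steak", "sirloin", "tenderloin", "pork chop", "duck", "chicken", "bacon"]
--     q_p, q_s, ll_neta = tipus_ingr(carns, llista, ingredient, "200g ", "30g ")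
--     if q_p:
--         return q_p, q_s, ll_neta
--
--     ice_cream = ["ice cream", "cream", "candy", "sherbet", "sorbet"]
--     q_p, q_s, ll_neta = tipus_ingr(ice_cream, llista, ingredient, "100g ", "20g ")
--     if q_p:
--         return q_p, q_s, ll_neta
--
--     quantitat_p = "200g "
--     quantitat_s = "10g "
--     amanida = ["lettuce", "basil", "lamb's lettuce", "summer purslane", "cabbage", "parsley", "herb", "coriander",
--                "cilantro", "oregano", "sage"]
--     for item in amanida:
--         if ingredient == item:
--             quantitat_p = "70g "
--             quantitat_s = "20g "
--
--     return quantitat_p, quantitat_s, llista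
-- ===== SOURCE B (Python) =====
-- # Table-driven re-implementation: one category table plus a first-wins
-- # ingredient->category dict built once; a call is a single dict lookup,
-- # one filter, and (for drinks) a cream cleanup.
--
-- _PEIXOS = ["mackerel", "fish", "fish steak", "salmon steak", "fish fillet", "salmon", "bass", "sea bass",
--            "fried calamari", "shrimp", "prawn"]
-- _PASTA = ["pasta", "spaghetti", "macaroni", "penne", "fettuccine", "spaghetti bolognese", "tagliatelle", "rice",
--           "noodle", "lasagna", "gnocchi"]
-- _LLEGUM = ["lentil", "beans", "lima bean", "pigeon pea", "garbanzo", "kidney bean", "chickpeas", "indian pea", "pea",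
--            "succotash", "moth bean", "horse gram", "buckwheat", "groats", "mung bean"]
-- _PASTISSOS = ["brownie", "chocolate cake", "torte", "chocolate chip cake", "fruitcake", "apple pie", "bread pudding",
--               "pastry", "muffin", "cookie", "blueberry muffin", "raisin muffin", "pork pie", "chocolate cookie",
--               "candy", "cream", "chocolate", "doughnut"]
-- _VERDURA = ["vegetable", "tomato", "carrot", "squash", "pumpkin", "celery", "curry", "cucumber", "broccoli",
--             "eggplant", "avocado", "onion", "cauliflower", "asparagus", "courgette", "pepper"]
-- _FRUITA = ["berry", "blueberry", "strawberry", "blackberry", "raspberry", "banana", "black currant", "pineapple",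
--            "apple", "lemon", "watermelon", "pear", "peach", "melon", "grape", "grapefruit"]
-- _BEGUDES = ["wine", "beer", "syrup", "coke", "lemonade", "milk", "tea"]
-- _BEGUDES_A = ["whisky", "rum", "brandy", "cognac", "liqueur", "tequila", "vodka"]
-- _PATATA = ["potato", "sweet potato", "mashed potatoes", "french fries", "chips"]
-- _PIZZA = ["pizza", "dough"]
-- _CARNS = ["steak", "beef", "pork", "beef steak", "sirloin", "tenderloin", "pork chop", "duck", "chicken", "bacon"]
-- _ICE_CREAM = ["ice cream", "cream", "candy", "sherbet", "sorbet"]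
-- _AMANIDA = ["lettuce", "basil", "lamb's lettuce", "summer purslane", "cabbage", "parsley", "herb", "coriander",
--             "cilantro", "oregano", "sage"]
--
-- _CATS = [
--     (_PEIXOS, "150g ", "30g "),
--     (_PASTA, "200g cooked ", "20g "),
--     (_LLEGUM, "170g cooked ", "30g "),
--     (_PASTISSOS, "100g ", "20g "),
--     (_VERDURA, "150g ", "50g "),
--     (_FRUITA, "150g ", "30g "),
--     (_BEGUDES, "180ml ", "50g "),
--     (_BEGUDES_A, "30ml ", "0g "),
--     (_PATATA, "150g ", "15g "),
--     (_PIZZA, "150g ", "5g "),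
--     (_CARNS, "200g ", "30g "),
--     (_ICE_CREAM, "100g ", "20g "),
-- ]
-- _BEGUDES_IDX = 6
--
-- # first-wins owner map: ingredient -> index of the first category listing it
-- _OWNER = {}
-- for _i, _cat in enumerate(_CATS):
--     for _m in _cat[0]:
--         if _m not in _OWNER:
--             _OWNER[_m] = _i
--
--
-- def llista_pes(llista, ingredient):
--     idx = _OWNER.get(ingredient)
--     if idx is None:
--         if ingredient in _AMANIDA:
--             return "70g ", "20g ", llista
--         return "200g ", "10g ", llista
--     members, q_p, q_s = _CATS[idx]
--     neta = [y for y in llista if y not in members]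
--     if idx == _BEGUDES_IDX:
--         neta = [y for y in neta if y != "cream"]
--     return q_p, q_s, neta
-- ===== Notes on version B (the rewrite author's own statement) =====
-- stated objective: simpler
-- what changed: Replaces the 12 copy-pasted category blocks (each rescanning its category and eagerly rebuilding the filtered list) with one data-driven category table plus a first-wins ingredient->category dict built once, so a call is a single dict lookup, one filter, and a plain cream filter for drinks.
-- intended difference: When the ingredient is a begudes drink and the list, after dropping begudes members, contains two consecutive 'cream' entries, A's del-inside-a-for loop skips the element right after each deleted 'cream' and returns a list that still contains 'cream'; B removes every 'cream', which is the evident intent of the cleanup. — e.g. on llista_pes(["cream", "cream"], "milk"): A returns ("180ml ", "50g ", ["cream"]), B returns ("180ml ", "50g ", [])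
import Mathlib
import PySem

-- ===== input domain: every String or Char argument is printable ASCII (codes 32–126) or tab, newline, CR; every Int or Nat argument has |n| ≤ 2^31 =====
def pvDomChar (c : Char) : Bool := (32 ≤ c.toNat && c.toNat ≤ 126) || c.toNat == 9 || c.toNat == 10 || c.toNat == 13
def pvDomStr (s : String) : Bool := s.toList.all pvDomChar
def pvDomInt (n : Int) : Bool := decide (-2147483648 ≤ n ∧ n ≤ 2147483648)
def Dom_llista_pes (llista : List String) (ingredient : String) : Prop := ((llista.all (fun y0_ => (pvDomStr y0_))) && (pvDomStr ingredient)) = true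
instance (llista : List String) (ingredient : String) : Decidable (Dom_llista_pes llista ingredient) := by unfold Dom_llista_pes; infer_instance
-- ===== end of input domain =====

-- B replaces A's 12 copy-pasted category blocks by a category table + first-wins owner
-- dict (objective: simpler); on the begudes path B removes every "cream" where A's
-- del-inside-a-for loop can leave some behind (stated as the intended difference D_).
-- A returns the argument list itself on the default path; B does the same.

-- ===== PORT A =====
-- the category lists (module literals in the Python)
def peixos : List String := ["mackerel", "fish", "fish steak", "salmon steak", "fish fillet", "salmon", "bass", "sea bass", "fried calamari", "shrimp", "prawn"]
def pasta : List String := ["pasta", "spaghetti", "macaroni", "penne", "fettuccine", "spaghetti bolognese", "tagliatelle", "rice", "noodle", "lasagna", "gnocchi"]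
def llegum : List String := ["lentil", "beans", "lima bean", "pigeon pea", "garbanzo", "kidney bean", "chickpeas", "indian pea", "pea", "succotash", "moth bean", "horse gram", "buckwheat", "groats", "mung bean"]
def pastissos : List String := ["brownie", "chocolate cake", "torte", "chocolate chip cake", "fruitcake", "apple pie", "bread pudding", "pastry", "muffin", "cookie", "blueberry muffin", "raisin muffin", "pork pie", "chocolate cookie", "candy", "cream", "chocolate", "doughnut"]
def verdura : List String := ["vegetable", "tomato", "carrot", "squash", "pumpkin", "celery", "curry", "cucumber", "broccoli", "eggplant", "avocado", "onion", "cauliflower", "asparagus", "courgette", "pepper"]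
def fruita : List String := ["berry", "blueberry", "strawberry", "blackberry", "raspberry", "banana", "black currant", "pineapple", "apple", "lemon", "watermelon", "pear", "peach", "melon", "grape", "grapefruit"]
def begudes : List String := ["wine", "beer", "syrup", "coke", "lemonade", "milk", "tea"]
def begudes_a : List String := ["whisky", "rum", "brandy", "cognac", "liqueur", "tequila", "vodka"]
def patata : List String := ["potato", "sweet potato", "mashed potatoes", "french fries", "chips"]
def pizza : List String := ["pizza", "dough"]
def carns : List String := ["steak", "beef", "pork", "beef steak", "sirloin", "tenderloin", "pork chop", "duck", "chicken", "bacon"]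
def ice_cream : List String := ["ice cream", "cream", "candy", "sherbet", "sorbet"]
def amanida : List String := ["lettuce", "basil", "lamb's lettuce", "summer purslane", "cabbage", "parsley", "herb", "coriander", "cilantro", "oregano", "sage"]

-- tipus_ingr: Python's quantitat_princ/quantitat_sec start as int 0 (falsy) and become
-- strings on a hit; the falsy/unset state is modelled as (none, ""), observably identical
-- since the caller only reads them when quantitat_princ is truthy (a nonempty string).
def tipusIngr (llista_tipus llista : List String) (ingredient q1 q2 : String) :
    Option String × String × List String :=
  llista_tipus.foldl
    (fun st item =>
      if ingredient == item then
        (some q1, q2, st.2.2 ++ llista.filter (fun y => !(llista_tipus.contains y)))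
      else st)
    ((none : Option String), "", ([] : List String))

-- Python's 'for x in ll_neta: if x == "cream": del ll_neta[n]; n += 1':
-- i is the live iterator position, n the hand-kept counter, both on the mutating list.
def delCreamLoop (lst : List String) (i n : Nat) : List String :=
  if h : i < lst.length then
    if lst[i] == "cream" then delCreamLoop (lst.eraseIdx n) (i + 1) (n + 1)
    else delCreamLoop lst (i + 1) (n + 1)
  else lst
termination_by lst.length - i
decreasing_by
  · have := List.length_eraseIdx_le (l := lst) (i := n); omega
  · omega

def llista_pes (llista : List String) (ingredient : String) : String × String × List String :=
  match tipusIngr peixos llista ingredient "150g " "30g " with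
  | (some qp, qs, ln) => (qp, qs, ln)
  | _ =>
  match tipusIngr pasta llista ingredient "200g cooked " "20g " with
  | (some qp, qs, ln) => (qp, qs, ln)
  | _ =>
  match tipusIngr llegum llista ingredient "170g cooked " "30g " with
  | (some qp, qs, ln) => (qp, qs, ln)
  | _ =>
  match tipusIngr pastissos llista ingredient "100g " "20g " with
  | (some qp, qs, ln) => (qp, qs, ln)
  | _ =>
  match tipusIngr verdura llista ingredient "150g " "50g " with
  | (some qp, qs, ln) => (qp, qs, ln)
  | _ =>
  match tipusIngr fruita llista ingredient "150g " "30g " with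
  | (some qp, qs, ln) => (qp, qs, ln)
  | _ =>
  match tipusIngr begudes llista ingredient "180ml " "50g " with
  | (some qp, qs, ln) => (qp, qs, delCreamLoop ln 0 0)
  | _ =>
  match tipusIngr begudes_a llista ingredient "30ml " "0g " with
  | (some qp, qs, ln) => (qp, qs, ln)
  | _ =>
  match tipusIngr patata llista ingredient "150g " "15g " with
  | (some qp, qs, ln) => (qp, qs, ln)
  | _ =>
  match tipusIngr pizza llista ingredient "150g " "5g " with
  | (some qp, qs, ln) => (qp, qs, ln)
  | _ =>
  match tipusIngr carns llista ingredient "200g " "30g " with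
  | (some qp, qs, ln) => (qp, qs, ln)
  | _ =>
  match tipusIngr ice_cream llista ingredient "100g " "20g " with
  | (some qp, qs, ln) => (qp, qs, ln)
  | _ =>
  let r := amanida.foldl
    (fun st item => if ingredient == item then ("70g ", "20g ") else st)
    ("200g ", "10g ")
  (r.1, r.2, llista)

-- ===== PORT B =====
def CATS : List (List String × String × String) :=
  [(peixos, "150g ", "30g "), (pasta, "200g cooked ", "20g "), (llegum, "170g cooked ", "30g "),
   (pastissos, "100g ", "20g "), (verdura, "150g ", "50g "), (fruita, "150g ", "30g "),
   (begudes, "180ml ", "50g "), (begudes_a, "30ml ", "0g "), (patata, "150g ", "15g "),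
   (pizza, "150g ", "5g "), (carns, "200g ", "30g "), (ice_cream, "100g ", "20g ")]

-- first-wins owner map: ingredient -> index of the first category listing it
def ownerDict : PySem.Dict String Int :=
  (PySem.List.enumerate CATS 0).foldl
    (fun d p => p.2.1.foldl (fun d m => if d.contains m then d else d.insert m p.1) d)
    PySem.Dict.empty

def llista_pes_alt (llista : List String) (ingredient : String) : String × String × List String :=
  match ownerDict.get? ingredient with
  | none =>
    if amanida.contains ingredient then ("70g ", "20g ", llista)
    else ("200g ", "10g ", llista)
  | some idx =>
    -- _CATS[idx]: every index stored in the owner dict is in range, so none is unreachable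
    match PySem.List.pyGet? CATS idx with
    | none => ("", "", [])
    | some (members, qp, qs) =>
      let neta := llista.filter (fun y => !(members.contains y))
      (qp, qs, if idx == 6 then neta.filter (fun y => y != "cream") else neta)

-- ===== PRECONDITION & SPEC =====
-- When the ingredient is a begudes drink and the list contains two "cream" entries
-- separated only by drink names, A's del-inside-a-for loop skips the element right
-- after each deleted "cream" and returns a list that still contains "cream";
-- B removes every "cream", which is the evident intent of the cleanup.
-- "the next non-drink word is cream"
def nextKeptIsCream : List String → Bool
  | [] => false
  | y :: t => if y ∈ begudes then nextKeptIsCream t else y == "cream"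

-- "somewhere a cream is followed (drink names apart) by another cream"
def hasAdjCreamRaw : List String → Bool
  | [] => false
  | y :: t => (y == "cream" && nextKeptIsCream t) || hasAdjCreamRaw t

def D_llista_pes (llista : List String) (ingredient : String) : Prop :=
  ingredient ∈ begudes ∧ hasAdjCreamRaw llista = true
instance (llista : List String) (ingredient : String) : Decidable (D_llista_pes llista ingredient) := by unfold D_llista_pes; infer_instance

def Spec_llista_pes (llista : List String) (ingredient : String) (out : String × String × List String) : Prop := ¬ D_llista_pes llista ingredient → out = llista_pes_alt llista ingredient
instance (llista : List String) (ingredient : String) (out : String × String × List String) : Decidable (Spec_llista_pes llista ingredient out) := by unfold Spec_llista_pes; infer_instance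

def pvDiffWitness_llista_pes : List String × String := (["cream", "cream"], "milk")
def pvDiffWitnessOut_llista_pes : (String × String × List String) × (String × String × List String) :=
  (("180ml ", "50g ", ["cream"]), ("180ml ", "50g ", []))

-- ===== CLAIM (what is proved, stated in full; the proofs are below) =====
def Claim_unchanged_llista_pes : Prop := ∀ (llista : List String) (ingredient : String), Dom_llista_pes llista ingredient → Spec_llista_pes llista ingredient (llista_pes llista ingredient)
def Claim_changed_llista_pes : Prop := Dom_llista_pes (pvDiffWitness_llista_pes.1) (pvDiffWitness_llista_pes.2) ∧ D_llista_pes (pvDiffWitness_llista_pes.1) (pvDiffWitness_llista_pes.2) ∧ llista_pes (pvDiffWitness_llista_pes.1) (pvDiffWitness_llista_pes.2) = pvDiffWitnessOut_llista_pes.1 ∧ llista_pes_alt (pvDiffWitness_llista_pes.1) (pvDiffWitness_llista_pes.2) = pvDiffWitnessOut_llista_pes.2 ∧ pvDiffWitnessOut_llista_pes.1 ≠ pvDiffWitnessOut_llista_pes.2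
def Claim_exact_llista_pes : Prop := ∀ (llista : List String) (ingredient : String), Dom_llista_pes llista ingredient → D_llista_pes llista ingredient → llista_pes llista ingredient ≠ llista_pes_alt llista ingredient

-- ===== LEMMAS AND PROOFS =====

-- proof-only: adjacency of creams on the already-filtered list
def hasAdjCream : List String → Bool
  | a :: b :: t => (a == "cream" && b == "cream") || hasAdjCream (b :: t)
  | _ => false

def headIsCream : List String → Bool
  | [] => false
  | a :: _ => a == "cream"

lemma hasAdjCream_cons (y : String) (xs : List String) :
    hasAdjCream (y :: xs) = ((y == "cream" && headIsCream xs) || hasAdjCream xs) := by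
  cases xs <;> simp [hasAdjCream, headIsCream]

lemma nextKept_eq (t : List String) :
    nextKeptIsCream t = headIsCream (t.filter (fun y => !(begudes.contains y))) := by
  induction t with
  | nil => rfl
  | cons a t ih =>
    by_cases hm : a ∈ begudes
    · simp [nextKeptIsCream, hm, ih]
    · simp [nextKeptIsCream, hm, headIsCream]

lemma raw_eq_filter (ll : List String) :
    hasAdjCreamRaw ll = hasAdjCream (ll.filter (fun y => !(begudes.contains y))) := by
  induction ll with
  | nil => rfl
  | cons y t ih =>
    by_cases hm : y ∈ begudes
    · have hy : (y == "cream") = false := by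
        have : y ≠ "cream" := by
          intro h; subst h; revert hm; decide
        simp [this]
      simp [hasAdjCreamRaw, hy, hm, ih]
    · simp only [hasAdjCreamRaw, List.filter_cons]
      rw [if_pos (by simp [hm]), hasAdjCream_cons, nextKept_eq, ih]

lemma foldl_guard_id {α : Type} (l : List String) (ing : String) (g : α → α) (s : α)
    (h : l.contains ing = false) :
    l.foldl (fun st item => if ing == item then g st else st) s = s := by
  induction l generalizing s with
  | nil => rfl
  | cons a t ih =>
    simp only [List.contains_cons, Bool.or_eq_false_iff] at h
    simp only [List.foldl_cons]
    rw [if_neg (by simp [h.1]), ih _ h.2]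

lemma foldl_guard_hit {σ : Type} (l : List String) (ing : String) (f : σ → σ) (s : σ)
    (hnd : l.Nodup) :
    l.foldl (fun st item => if ing == item then f st else st) s
      = if l.contains ing then f s else s := by
  induction l generalizing s with
  | nil => simp
  | cons a t ih =>
    simp only [List.foldl_cons, List.contains_cons]
    by_cases h : (ing == a) = true
    · rw [if_pos h]
      have ha : ing = a := by simpa using h
      have ht : t.contains ing = false := by
        subst ha
        simpa using (List.nodup_cons.mp hnd).1
      rw [foldl_guard_id _ _ _ _ ht, if_pos (by simp [h])]
    · rw [if_neg h, ih _ (List.nodup_cons.mp hnd).2]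
      have : (ing == a || t.contains ing) = t.contains ing := by
        simp [h]
      rw [this]

lemma foldl_guard_const {α : Type} (l : List String) (ing : String) (c s : α) :
    l.foldl (fun st item => if ing == item then c else st) s
      = if l.contains ing then c else s := by
  induction l generalizing s with
  | nil => simp
  | cons a t ih =>
    simp only [List.foldl_cons, List.contains_cons]
    by_cases h : (ing == a) = true
    · rw [if_pos h, ih c]
      have hT : ((ing == a || t.contains ing) = true) := by simp [h]
      rw [if_pos hT]
      split <;> rfl
    · rw [if_neg h, ih s]
      have : (ing == a || t.contains ing) = t.contains ing := by simp [h]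
      rw [this]

lemma tipusIngr_eq (lt ll : List String) (ing q1 q2 : String) (hnd : lt.Nodup) :
    tipusIngr lt ll ing q1 q2
      = if lt.contains ing then
          (some q1, q2, ll.filter (fun y => !(lt.contains y)))
        else (none, "", []) := by
  unfold tipusIngr
  rw [foldl_guard_hit _ _ _ _ hnd]
  split <;> rfl

-- proof-only normal form of A's cream loop: remove each "cream" but keep the
-- (skipped) element immediately after it
def dropCream : List String → List String
  | [] => []
  | [a] => if a == "cream" then [] else [a]
  | a :: b :: t => if a == "cream" then b :: dropCream t else a :: dropCream (b :: t)

lemma dropCream_cons_cream (rest : List String) :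
    dropCream ("cream" :: rest) = rest.take 1 ++ dropCream (rest.drop 1) := by
  cases rest <;> simp [dropCream]

lemma dropCream_cons_other (x : String) (rest : List String) (h : (x == "cream") = false) :
    dropCream (x :: rest) = x :: dropCream rest := by
  cases rest <;> simp [dropCream, h]

lemma delCream_take_drop (k : Nat) : ∀ (lst : List String) (i : Nat), lst.length - i ≤ k →
    delCreamLoop lst i i = lst.take i ++ dropCream (lst.drop i) := by
  induction k with
  | zero =>
    intro lst i h
    have hi : ¬ i < lst.length := by omega
    rw [delCreamLoop, dif_neg hi,
        List.drop_eq_nil_of_le (by omega), List.take_of_length_le (by omega)]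
    simp [dropCream]
  | succ k ih =>
    intro lst i h
    by_cases hi : i < lst.length
    · rw [delCreamLoop, dif_pos hi]
      by_cases hc : (lst[i] == "cream") = true
      · rw [if_pos hc]
        have hE : lst.eraseIdx i = lst.take i ++ lst.drop (i + 1) :=
          List.eraseIdx_eq_take_drop_succ lst i
        have hlen : (lst.eraseIdx i).length = lst.length - 1 := by
          rw [List.length_eraseIdx, if_pos hi]
        have hti : (lst.take i).length = i := by
          rw [List.length_take]; omega
        rw [ih (lst.eraseIdx i) (i + 1) (by omega)]
        rw [hE, List.take_append, List.drop_append, hti]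
        have h1 : i + 1 - i = 1 := by omega
        rw [h1]
        rw [show List.take (i + 1) (List.take i lst) = List.take i lst from by
              rw [List.take_take]; congr 1; omega]
        rw [show List.drop (i + 1) (List.take i lst) = ([] : List String) from
              List.drop_eq_nil_of_le (by rw [hti]; omega)]
        have hcs : lst[i] = "cream" := by simpa using hc
        rw [List.drop_eq_getElem_cons hi, hcs, dropCream_cons_cream]
        simp [List.drop_drop]
      · rw [if_neg hc, ih lst (i + 1) (by omega)]
        rw [show List.take (i + 1) lst = List.take i lst ++ [lst[i]] from by
              rw [List.take_add_one, List.getElem?_eq_getElem hi]; rfl]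
        rw [List.drop_eq_getElem_cons hi, dropCream_cons_other _ _ (by simpa using hc)]
        rw [List.append_assoc]; rfl
    · rw [delCreamLoop, dif_neg hi,
          List.drop_eq_nil_of_le (by omega), List.take_of_length_le (by omega)]
      simp [dropCream]

lemma delCream_eq (lst : List String) : delCreamLoop lst 0 0 = dropCream lst := by
  simpa using delCream_take_drop lst.length lst 0 (by omega)

lemma hasAdjCream_tail (b : String) (t : List String) (h : hasAdjCream (b :: t) = false) :
    hasAdjCream t = false := by
  cases t with
  | nil => rfl
  | cons c t' =>
    simp only [hasAdjCream, Bool.or_eq_false_iff] at h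
    exact h.2

lemma dropCream_eq_filter_fuel (k : Nat) : ∀ xs : List String, xs.length ≤ k →
    hasAdjCream xs = false → dropCream xs = xs.filter (fun y => y != "cream") := by
  induction k with
  | zero =>
    intro xs hlen _
    have : xs = [] := List.eq_nil_of_length_eq_zero (by omega)
    subst this; rfl
  | succ k ih =>
    intro xs hlen h
    match xs with
    | [] => rfl
    | [a] =>
      by_cases hc : (a == "cream") = true
      · simp [dropCream, List.filter, hc, bne]
      · simp [dropCream, List.filter, hc, bne]
    | a :: b :: t =>
      by_cases hc : (a == "cream") = true
      · simp only [hasAdjCream, Bool.or_eq_false_iff, Bool.and_eq_false_iff] at h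
        have hb : (b == "cream") = false := by
          rcases h.1 with h' | h'
          · exact absurd hc (by simp [h'])
          · exact h'
        have ht : hasAdjCream t = false := hasAdjCream_tail b t h.2
        have hlt : t.length ≤ k := by simp at hlen; omega
        simp only [dropCream, if_pos hc, ih t hlt ht]
        have ha : a = "cream" := by simpa using hc
        subst ha
        simp [List.filter, hb, bne]
      · have h' : hasAdjCream (b :: t) = false := by
          simp only [hasAdjCream, Bool.or_eq_false_iff] at h
          exact h.2
        have hlt : (b :: t).length ≤ k := by simp at hlen ⊢; omega
        simp only [dropCream, if_neg hc, ih (b :: t) hlt h']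
        simp [List.filter, hc, bne]

lemma dropCream_eq_filter (xs : List String) (h : hasAdjCream xs = false) :
    dropCream xs = xs.filter (fun y => y != "cream") :=
  dropCream_eq_filter_fuel xs.length xs le_rfl h

lemma cream_mem_dropCream_fuel (k : Nat) : ∀ xs : List String, xs.length ≤ k →
    hasAdjCream xs = true → "cream" ∈ dropCream xs := by
  induction k with
  | zero =>
    intro xs hlen h
    have : xs = [] := List.eq_nil_of_length_eq_zero (by omega)
    subst this; simp [hasAdjCream] at h
  | succ k ih =>
    intro xs hlen h
    match xs with
    | [] => simp [hasAdjCream] at h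
    | [a] => simp [hasAdjCream] at h
    | a :: b :: t =>
      by_cases hc : (a == "cream") = true
      · simp only [dropCream, if_pos hc]
        by_cases hb : (b == "cream") = true
        · have : b = "cream" := by simpa using hb
          simp [this]
        · have ht : hasAdjCream t = true := by
            simp only [hasAdjCream] at h
            rcases Bool.or_eq_true_iff.mp h with h' | h'
            · exact absurd ((Bool.and_eq_true_iff.mp h').2) hb
            · cases t with
              | nil => simp [hasAdjCream] at h'
              | cons c t' =>
                simp only [hasAdjCream] at h'
                rcases Bool.or_eq_true_iff.mp h' with h'' | h''
                · exact absurd (Bool.and_eq_true_iff.mp h'').1 hb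
                · simp [h'']
          have hlt : t.length ≤ k := by simp at hlen; omega
          exact List.mem_cons_of_mem _ (ih t hlt ht)
      · have h' : hasAdjCream (b :: t) = true := by
          simp only [hasAdjCream] at h
          rcases Bool.or_eq_true_iff.mp h with h'' | h''
          · exact absurd (Bool.and_eq_true_iff.mp h'').1 hc
          · exact h''
        have hlt : (b :: t).length ≤ k := by simp at hlen ⊢; omega
        simp only [dropCream, if_neg hc]
        exact List.mem_cons_of_mem _ (ih (b :: t) hlt h')

lemma cream_mem_dropCream (xs : List String) (h : hasAdjCream xs = true) :
    "cream" ∈ dropCream xs :=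
  cream_mem_dropCream_fuel xs.length xs le_rfl h

-- first category (from start index s) whose member list contains ing
def firstIdx : List (List String × String × String) → Int → String → Option Int
  | [], _, _ => none
  | c :: cs, s, ing => if c.1.contains ing then some s else firstIdx cs (s + 1) ing

lemma get?_of_not_contains {d : PySem.Dict String Int} {k : String}
    (h : d.contains k = false) : d.get? k = none :=
  (PySem.Dict.get?_eq_none_iff_contains d k).mpr h

lemma inner_get (ms : List String) (d : PySem.Dict String Int) (i : Int) (ing : String) :
    (ms.foldl (fun d m => if d.contains m then d else d.insert m i) d).get? ing
      = if d.contains ing then d.get? ing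
        else if ms.contains ing then some i else none := by
  induction ms generalizing d with
  | nil =>
    simp only [List.foldl_nil, List.contains_nil]
    by_cases hc : d.contains ing = true
    · rw [if_pos hc]
    · rw [if_neg hc, if_neg (by simp), get?_of_not_contains (by simpa using hc)]
  | cons m ms ih =>
    simp only [List.foldl_cons]
    by_cases hm : d.contains m = true
    · rw [if_pos hm, ih]
      by_cases hing : d.contains ing = true
      · rw [if_pos hing, if_pos hing]
      · have hne : (ing == m) = false := by
          by_cases e : ing = m
          · subst e; simp_all
          · simp [e]
        rw [if_neg hing, if_neg hing]
        have e : ¬ ing = m := by simpa using hne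
        simp [e]
    · rw [if_neg hm, ih]
      by_cases e : ing = m
      · subst e
        rw [if_pos (by simp),
            PySem.Dict.get?_insert, if_pos rfl,
            if_neg (by simpa using hm), if_pos (by simp)]
      · have hci : (d.insert m i).contains ing = d.contains ing := by
          rw [PySem.Dict.contains_insert]; simp [e]
        rw [hci, PySem.Dict.get?_insert, if_neg e]
        have : (m :: ms).contains ing = ms.contains ing := by
          simp [e]
        rw [this]

lemma inner_contains (ms : List String) (d : PySem.Dict String Int) (i : Int) (ing : String) :
    (ms.foldl (fun d m => if d.contains m then d else d.insert m i) d).contains ing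
      = (d.contains ing || ms.contains ing) := by
  rw [PySem.Dict.contains_eq_isSome_get?, inner_get]
  by_cases h : d.contains ing = true
  · rw [if_pos h, h, ← PySem.Dict.contains_eq_isSome_get?, h]
    rfl
  · rw [if_neg h]
    cases hms : ms.contains ing <;> simp_all

lemma outer_get (cats : List (List String × String × String)) (d : PySem.Dict String Int)
    (s : Int) (ing : String) :
    ((PySem.List.enumerate cats s).foldl
        (fun d p => p.2.1.foldl (fun d m => if d.contains m then d else d.insert m p.1) d)
        d).get? ing
      = if d.contains ing then d.get? ing else firstIdx cats s ing := by
  induction cats generalizing d s with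
  | nil =>
    simp only [PySem.List.enumerate_nil, List.foldl_nil, firstIdx]
    by_cases hc : d.contains ing = true
    · rw [if_pos hc]
    · rw [if_neg hc, get?_of_not_contains (by simpa using hc)]
  | cons c cs ih =>
    rw [PySem.List.enumerate_cons]
    simp only [List.foldl_cons]
    rw [ih, inner_contains, inner_get, firstIdx]
    by_cases hd : d.contains ing = true
    · simp [hd]
    · simp only [hd, Bool.false_or]
      by_cases hc : ing ∈ c.1 <;> simp [hc]

lemma owner_get (ing : String) : ownerDict.get? ing = firstIdx CATS 0 ing := by
  unfold ownerDict
  rw [outer_get, if_neg (by rw [PySem.Dict.contains_empty]; exact Bool.false_ne_true)]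

lemma firstIdx_CATS (ing : String) : firstIdx CATS 0 ing =
    if peixos.contains ing = true then some 0
    else if pasta.contains ing = true then some 1
    else if llegum.contains ing = true then some 2
    else if pastissos.contains ing = true then some 3
    else if verdura.contains ing = true then some 4
    else if fruita.contains ing = true then some 5
    else if begudes.contains ing = true then some 6
    else if begudes_a.contains ing = true then some 7
    else if patata.contains ing = true then some 8
    else if pizza.contains ing = true then some 9
    else if carns.contains ing = true then some 10
    else if ice_cream.contains ing = true then some 11
    else none := by
  simp only [CATS, firstIdx]
  norm_num

-- A's result in the begudes branch, with the earlier categories known to miss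
lemma llista_pes_begudes (ll : List String) (ing : String)
    (h1 : peixos.contains ing = false) (h2 : pasta.contains ing = false)
    (h3 : llegum.contains ing = false) (h4 : pastissos.contains ing = false)
    (h5 : verdura.contains ing = false) (h6 : fruita.contains ing = false)
    (h7 : begudes.contains ing = true) :
    llista_pes ll ing
      = ("180ml ", "50g ", dropCream (ll.filter (fun y => !(begudes.contains y)))) := by
  unfold llista_pes
  rw [tipusIngr_eq peixos ll ing _ _ (by decide),
      tipusIngr_eq pasta ll ing _ _ (by decide),
      tipusIngr_eq llegum ll ing _ _ (by decide),
      tipusIngr_eq pastissos ll ing _ _ (by decide),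
      tipusIngr_eq verdura ll ing _ _ (by decide),
      tipusIngr_eq fruita ll ing _ _ (by decide),
      tipusIngr_eq begudes ll ing _ _ (by decide)]
  simp only [h1, h2, h3, h4, h5, h6, h7, reduceIte, delCream_eq]
  rfl

-- ===== VERDICT (by name: the statement is the Claim_ definitions above) =====
set_option maxRecDepth 40000 in
theorem llista_pes_spec : Claim_unchanged_llista_pes := by
  intro ll ing _ hnD
  show llista_pes ll ing = llista_pes_alt ll ing
  unfold llista_pes llista_pes_alt
  rw [owner_get, firstIdx_CATS,
      tipusIngr_eq peixos ll ing _ _ (by decide),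
      tipusIngr_eq pasta ll ing _ _ (by decide),
      tipusIngr_eq llegum ll ing _ _ (by decide),
      tipusIngr_eq pastissos ll ing _ _ (by decide),
      tipusIngr_eq verdura ll ing _ _ (by decide),
      tipusIngr_eq fruita ll ing _ _ (by decide),
      tipusIngr_eq begudes ll ing _ _ (by decide),
      tipusIngr_eq begudes_a ll ing _ _ (by decide),
      tipusIngr_eq patata ll ing _ _ (by decide),
      tipusIngr_eq pizza ll ing _ _ (by decide),
      tipusIngr_eq carns ll ing _ _ (by decide),
      tipusIngr_eq ice_cream ll ing _ _ (by decide),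
      foldl_guard_const]
  by_cases h1 : peixos.contains ing = true
  · simp only [h1, reduceIte]; rfl
  have h1' : peixos.contains ing = false := by simpa using h1
  by_cases h2 : pasta.contains ing = true
  · simp only [h1', h2, reduceIte]; rfl
  have h2' : pasta.contains ing = false := by simpa using h2
  by_cases h3 : llegum.contains ing = true
  · simp only [h1', h2', h3, reduceIte]; rfl
  have h3' : llegum.contains ing = false := by simpa using h3
  by_cases h4 : pastissos.contains ing = true
  · simp only [h1', h2', h3', h4, reduceIte]; rfl
  have h4' : pastissos.contains ing = false := by simpa using h4
  by_cases h5 : verdura.contains ing = true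
  · simp only [h1', h2', h3', h4', h5, reduceIte]; rfl
  have h5' : verdura.contains ing = false := by simpa using h5
  by_cases h6 : fruita.contains ing = true
  · simp only [h1', h2', h3', h4', h5', h6, reduceIte]; rfl
  have h6' : fruita.contains ing = false := by simpa using h6
  by_cases h7 : begudes.contains ing = true
  · have hadj : hasAdjCream (ll.filter (fun y => !(begudes.contains y))) = false := by
      cases hx : hasAdjCream (ll.filter (fun y => !(begudes.contains y))) with
      | false => rfl
      | true =>
        refine absurd (⟨by simpa using h7, ?_⟩ : D_llista_pes ll ing) hnD
        rw [raw_eq_filter]; exact hx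
    simp only [h1', h2', h3', h4', h5', h6', h7, reduceIte, delCream_eq,
      dropCream_eq_filter _ hadj]
    rfl
  have h7' : begudes.contains ing = false := by simpa using h7
  by_cases h8 : begudes_a.contains ing = true
  · simp only [h1', h2', h3', h4', h5', h6', h7', h8, reduceIte]; rfl
  have h8' : begudes_a.contains ing = false := by simpa using h8
  by_cases h9 : patata.contains ing = true
  · simp only [h1', h2', h3', h4', h5', h6', h7', h8', h9, reduceIte]; rfl
  have h9' : patata.contains ing = false := by simpa using h9
  by_cases h10 : pizza.contains ing = true
  · simp only [h1', h2', h3', h4', h5', h6', h7', h8', h9', h10, reduceIte]; rfl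
  have h10' : pizza.contains ing = false := by simpa using h10
  by_cases h11 : carns.contains ing = true
  · simp only [h1', h2', h3', h4', h5', h6', h7', h8', h9', h10', h11, reduceIte]; rfl
  have h11' : carns.contains ing = false := by simpa using h11
  by_cases h12 : ice_cream.contains ing = true
  · simp only [h1', h2', h3', h4', h5', h6', h7', h8', h9', h10', h11', h12, reduceIte]; rfl
  have h12' : ice_cream.contains ing = false := by simpa using h12
  by_cases h13 : amanida.contains ing = true
  · simp only [h1', h2', h3', h4', h5', h6', h7', h8', h9', h10', h11', h12', h13, reduceIte]
    rfl
  · have h13' : amanida.contains ing = false := by simpa using h13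
    simp only [h1', h2', h3', h4', h5', h6', h7', h8', h9', h10', h11', h12', h13']
    rfl

set_option maxRecDepth 40000 in
theorem llista_pes_changed : Claim_changed_llista_pes := by
  unfold Claim_changed_llista_pes
  refine ⟨by decide, by decide, ?_, by decide, by decide⟩
  show llista_pes ["cream", "cream"] "milk" = ("180ml ", "50g ", ["cream"])
  rw [llista_pes_begudes _ _ (by decide) (by decide) (by decide) (by decide)
        (by decide) (by decide) (by decide)]
  decide

theorem llista_pes_tight : Claim_exact_llista_pes := by
  intro ll ing _ hD hEq
  obtain ⟨hb, hadj0⟩ := hD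
  rw [raw_eq_filter] at hadj0
  have hadj : hasAdjCream (ll.filter (fun y => !(begudes.contains y))) = true := hadj0
  have h7 : begudes.contains ing = true := by simpa using hb
  have hmem : ing ∈ begudes := by simpa using h7
  have h1 : peixos.contains ing = false := by
    fin_cases hmem <;> decide
  have h2 : pasta.contains ing = false := by
    fin_cases hmem <;> decide
  have h3 : llegum.contains ing = false := by
    fin_cases hmem <;> decide
  have h4 : pastissos.contains ing = false := by
    fin_cases hmem <;> decide
  have h5 : verdura.contains ing = false := by
    fin_cases hmem <;> decide
  have h6 : fruita.contains ing = false := by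
    fin_cases hmem <;> decide
  have hA := llista_pes_begudes ll ing h1 h2 h3 h4 h5 h6 h7
  have hB : llista_pes_alt ll ing
      = ("180ml ", "50g ",
         (ll.filter (fun y => !(begudes.contains y))).filter (fun y => y != "cream")) := by
    unfold llista_pes_alt
    rw [owner_get, firstIdx_CATS]
    simp only [h1, h2, h3, h4, h5, h6, h7, reduceIte]
    rfl
  rw [hA, hB] at hEq
  have hthird : dropCream (ll.filter (fun y => !(begudes.contains y)))
      = (ll.filter (fun y => !(begudes.contains y))).filter (fun y => y != "cream") := by
    have := congrArg (fun p => p.2.2) hEq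
    simpa using this
  have hin : "cream" ∈ dropCream (ll.filter (fun y => !(begudes.contains y))) :=
    cream_mem_dropCream _ hadj
  rw [hthird] at hin
  have := List.of_mem_filter hin
  simp at this
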